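-- pv_equiv track=rewrite | github.com/DavidDuncker/FultonCountyBallotScanner | image_analysis/qr_code_scanner.py | find_qr_code_rows
-- ===== SOURCE A (Python) =====
-- def find_qr_code_rows(groups_of_white_rows):
--     number_of_large_groups_of_white_rows = 0
--     found_second_large_group_of_white_rows = False
--     row_containing_start_of_qr_code = 0
--     row_containing_end_of_qr_code = 0
--     for group in groups_of_white_rows:
--         if found_second_large_group_of_white_rows == True:
--             row_containing_end_of_qr_code = group[0]
--             return row_containing_start_of_qr_code, row_containing_end_of_qr_code
--         number_of_white_rows = group[1] - group[0]
--         if number_of_white_rows > 75: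
--             number_of_large_groups_of_white_rows += 1
--         if number_of_large_groups_of_white_rows == 2:
--             row_containing_start_of_qr_code = group[1]
--             found_second_large_group_of_white_rows = True
--
--     return -1, -1
-- ===== SOURCE B (Python) =====
-- def find_qr_code_rows(groups_of_white_rows):
--     # Stage 1: discard groups up to (not including) the first large one;
--     # Stage 2: discard again up to the second large one; read the answer
--     # off the first two entries of what remains.
--     def skip_to_large(gs):
--         while gs and gs[0][1] - gs[0][0] <= 75:
--             gs = gs[1:]
--         return gs
--
--     rest1 = skip_to_large(groups_of_white_rows)
--     rest2 = skip_to_large(rest1[1:])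
--     if len(rest2) >= 2:
--         return rest2[0][1], rest2[1][0]
--     return -1, -1
-- ===== Notes on version B (the rewrite author's own statement) =====
-- stated objective: alternative
-- what changed: Replaces A's counter-and-flag single-pass state machine by two staged suffix computations: a skip_to_large helper that drops groups up to the next large one, applied twice, with the answer read off the first two entries of the remaining suffix.
import Mathlib
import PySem

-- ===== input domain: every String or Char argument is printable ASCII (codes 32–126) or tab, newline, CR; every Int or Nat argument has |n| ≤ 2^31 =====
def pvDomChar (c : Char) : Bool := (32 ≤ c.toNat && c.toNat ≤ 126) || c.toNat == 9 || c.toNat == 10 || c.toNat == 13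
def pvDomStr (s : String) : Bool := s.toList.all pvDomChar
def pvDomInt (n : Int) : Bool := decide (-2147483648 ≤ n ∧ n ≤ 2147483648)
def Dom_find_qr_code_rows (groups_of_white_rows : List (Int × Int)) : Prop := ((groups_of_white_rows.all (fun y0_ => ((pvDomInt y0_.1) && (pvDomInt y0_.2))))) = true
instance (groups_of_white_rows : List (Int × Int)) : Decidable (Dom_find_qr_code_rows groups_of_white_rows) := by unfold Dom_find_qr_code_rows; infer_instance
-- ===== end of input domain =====

-- B replaces A's counter-and-flag state machine by two staged skip-to-next-large-group
-- suffix computations (objective: alternative decomposition, same cost).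


-- ===== PORT A =====
-- A's for-loop with mutable state (count, found-flag, start) as structural recursion.
def find_qr_code_rows_go (groups : List (Int × Int)) (count : Int) (found : Bool)
    (start : Int) : Int × Int :=
  match groups with
  | [] => (-1, -1)
  | group :: rest =>
    if found = true then (start, group.1)
    else
      let number_of_white_rows := group.2 - group.1
      let count' := if number_of_white_rows > 75 then count + 1 else count
      if count' = 2 then find_qr_code_rows_go rest count' true group.2
      else find_qr_code_rows_go rest count' found start

def find_qr_code_rows (groups_of_white_rows : List (Int × Int)) : Int × Int :=
  find_qr_code_rows_go groups_of_white_rows 0 false 0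

-- ===== PORT B =====
-- Source B's while loop 'while gs and gs[0][1]-gs[0][0] <= 75: gs = gs[1:]' as recursion on gs.
def skip_to_large (gs : List (Int × Int)) : List (Int × Int) :=
  match gs with
  | [] => []
  | g :: rest => if g.2 - g.1 ≤ 75 then skip_to_large rest else g :: rest

def find_qr_code_rows_alt (groups_of_white_rows : List (Int × Int)) : Int × Int :=
  let rest1 := skip_to_large groups_of_white_rows
  let rest2 := skip_to_large rest1.tail   -- rest1[1:]
  match rest2 with        -- len(rest2) >= 2 → (rest2[0][1], rest2[1][0])
  | g0 :: g1 :: _ => (g0.2, g1.1)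
  | _ => (-1, -1)

-- ===== PRECONDITION & SPEC =====
def Spec_find_qr_code_rows (groups_of_white_rows : List (Int × Int)) (out : Int × Int) : Prop := out = find_qr_code_rows_alt groups_of_white_rows
instance (groups_of_white_rows : List (Int × Int)) (out : Int × Int) : Decidable (Spec_find_qr_code_rows groups_of_white_rows out) := by unfold Spec_find_qr_code_rows; infer_instance

-- ===== CLAIM (what is proved, stated in full; the proofs are below) =====
def Claim_equal_find_qr_code_rows : Prop := ∀ (groups_of_white_rows : List (Int × Int)), Dom_find_qr_code_rows groups_of_white_rows → Spec_find_qr_code_rows groups_of_white_rows (find_qr_code_rows groups_of_white_rows)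

-- ===== LEMMAS AND PROOFS =====

-- Characterisation shared by the two proofs: the answer when k more large groups are needed.
def qrNeed (k : Nat) (groups : List (Int × Int)) : Int × Int :=
  match groups with
  | [] => (-1, -1)
  | g :: rest =>
    if g.2 - g.1 > 75 then
      if k = 1 then
        match rest with
        | [] => (-1, -1)
        | g' :: _ => (g.2, g'.1)
      else qrNeed (k - 1) rest
    else qrNeed k rest

theorem go_found (rest : List (Int × Int)) (c s : Int) :
    find_qr_code_rows_go rest c true s =
      (match rest with | [] => (-1, -1) | g :: _ => (s, g.1)) := by
  cases rest <;> simp [find_qr_code_rows_go]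

theorem go_one (groups : List (Int × Int)) (s : Int) :
    find_qr_code_rows_go groups 1 false s = qrNeed 1 groups := by
  induction groups generalizing s with
  | nil => simp [find_qr_code_rows_go, qrNeed]
  | cons g rest ih =>
    by_cases h : g.2 - g.1 > 75
    · simp [find_qr_code_rows_go, qrNeed, h, go_found]
    · simp [find_qr_code_rows_go, qrNeed, h, ih]

theorem go_zero (groups : List (Int × Int)) (s : Int) :
    find_qr_code_rows_go groups 0 false s = qrNeed 2 groups := by
  induction groups generalizing s with
  | nil => simp [find_qr_code_rows_go, qrNeed]
  | cons g rest ih =>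
    by_cases h : g.2 - g.1 > 75
    · simp [find_qr_code_rows_go, qrNeed, h, go_one]
    · simp [find_qr_code_rows_go, qrNeed, h, ih]

-- skipping non-large groups is transparent to qrNeed
theorem qrNeed_skip (k : Nat) (gs : List (Int × Int)) :
    qrNeed k (skip_to_large gs) = qrNeed k gs := by
  induction gs with
  | nil => rfl
  | cons g rest ih =>
    by_cases h : g.2 - g.1 ≤ 75
    · have h' : ¬ g.2 - g.1 > 75 := by omega
      simp [skip_to_large, qrNeed, h, h', ih]
    · simp [skip_to_large, h]

theorem skip_head_large (gs : List (Int × Int)) (g : Int × Int) (rest : List (Int × Int))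
    (h : skip_to_large gs = g :: rest) : g.2 - g.1 > 75 := by
  induction gs with
  | nil => simp [skip_to_large] at h
  | cons a tl ih =>
    by_cases ha : a.2 - a.1 ≤ 75
    · exact ih (by simpa [skip_to_large, ha] using h)
    · simp [skip_to_large, ha] at h
      rcases h with ⟨rfl, rfl⟩
      omega

theorem alt_need (groups : List (Int × Int)) :
    find_qr_code_rows_alt groups = qrNeed 2 groups := by
  rw [← qrNeed_skip 2 groups]
  simp only [find_qr_code_rows_alt]
  cases h1 : skip_to_large groups with
  | nil => simp [skip_to_large, qrNeed]
  | cons g rest =>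
    have hg : g.2 - g.1 > 75 := skip_head_large _ _ _ h1
    have h2 : qrNeed 2 (g :: rest) = qrNeed 1 (skip_to_large rest) := by
      simp [qrNeed, hg, qrNeed_skip]
    rw [h2]
    simp only [List.tail_cons]
    cases h3 : skip_to_large rest with
    | nil => simp [skip_to_large, qrNeed]
    | cons g' rest' =>
      have hg' : g'.2 - g'.1 > 75 := skip_head_large _ _ _ h3
      cases rest' with
      | nil => simp [qrNeed, hg']
      | cons g'' tl => simp [qrNeed, hg']

-- ===== VERDICT (by name: the statement is the Claim_ definition above) =====
theorem find_qr_code_rows_spec : Claim_equal_find_qr_code_rows := by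
  intro groups _
  unfold Spec_find_qr_code_rows find_qr_code_rows
  rw [go_zero, alt_need]
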